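-- pv_equiv track=rewrite | github.com/jvtubergen/map-fusion | src/coverage.py | history_to_sequence
-- ===== SOURCE A (Python) =====
-- def history_to_sequence(history):
--
--     steps = []
--     cq = -1
--     for cp, ((a0, b0), (a1, b1)) in enumerate(zip(history,history[1:])):
--
--         cq  = max(cq, a0)
--         steps.append((cp,cq))
--
--         steps_to_take = a1 - cq - 1
--         for i in range(1, 1 + steps_to_take):
--             steps.append((cp, cq + i))
--
--     # Final value
--     steps.append((len(history) - 1, max(cq, history[-1][0])))
--
--     return steps
-- ===== SOURCE B (Python) =====
-- def history_to_sequence(history):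
--     # Two-pointer staircase walk: one pair emitted per iteration; advance the
--     # value pointer `cur` while it lags the next a0, else advance the index `cp`.
--     steps = []
--     cp, cur = 0, -1
--     while cp < len(history) - 1:
--         if cur < history[cp][0]:
--             cur = history[cp][0]
--         steps.append((cp, cur))
--         if cur + 1 < history[cp + 1][0]:
--             cur += 1
--         else:
--             cp += 1
--     steps.append((cp, max(cur, history[cp][0])))
--     return steps
-- ===== Notes on version B (the rewrite author's own statement) =====
-- stated objective: alternative
-- what changed: Replaced A's nested loops (outer pass over adjacent pairs with an inner range loop emitting each gap) by a single two-pointer while loop that emits exactly one pair per iteration and advances either the value pointer cur or the index pointer cp.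
-- outside the precondition, e.g. on history_to_sequence([]): A raises IndexError, B raises IndexError
import Mathlib
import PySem

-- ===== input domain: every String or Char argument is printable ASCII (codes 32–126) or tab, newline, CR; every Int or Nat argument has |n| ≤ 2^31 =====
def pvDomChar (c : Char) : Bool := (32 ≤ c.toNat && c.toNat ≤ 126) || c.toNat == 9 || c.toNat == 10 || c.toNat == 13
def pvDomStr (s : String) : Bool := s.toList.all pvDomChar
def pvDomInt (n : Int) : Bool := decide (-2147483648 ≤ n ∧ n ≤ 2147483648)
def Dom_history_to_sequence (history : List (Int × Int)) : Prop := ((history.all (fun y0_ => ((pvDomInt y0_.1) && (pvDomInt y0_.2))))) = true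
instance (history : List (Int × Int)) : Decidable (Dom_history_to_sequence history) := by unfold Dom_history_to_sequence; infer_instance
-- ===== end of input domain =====

-- B replaces A's nested loops (outer over pairs, inner range loop) by a single
-- two-pointer while loop emitting one pair per iteration; objective: alternative
-- decomposition (same cost).

-- ===== PORT A =====
-- the for-loop over enumerate(zip(history, history[1:])) with state (steps, cq)
def pvALoop : List ((Int × Int) × (Int × Int)) → Int → Int → List (Int × Int) → (List (Int × Int) × Int)
  | [], _, cq, steps => (steps, cq)
  | ((a0, _b0), (a1, _b1)) :: rest, cp, cq, steps =>
    let cq' := max cq a0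
    let steps1 := steps ++ [(cp, cq')]
    let steps2 := steps1 ++ (PySem.List.pyRange 1 (1 + (a1 - cq' - 1)) 1).map (fun i => (cp, cq' + i))
    pvALoop rest (cp + 1) cq' steps2

def history_to_sequence (history : List (Int × Int)) : List (Int × Int) :=
  let r := pvALoop (history.zip (history.drop 1)) 0 (-1) []
  r.1 ++ [(((history.length : Int) - 1, max r.2 ((PySem.List.pyGet? history (-1)).getD (0, 0)).1))]

-- ===== PORT B =====
-- the while loop: emit (cp, cur), then advance cur (value pointer) or cp (index pointer)
def pvBLoop (history : List (Int × Int)) (cp cur : Int) : List (Int × Int) × Int × Int :=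
  if hlt : cp < (history.length : Int) - 1 then
    let cur' := if cur < (PySem.List.pyGetD history cp (0, 0)).1
                then (PySem.List.pyGetD history cp (0, 0)).1 else cur
    let r := if hc : cur' + 1 < (PySem.List.pyGetD history (cp + 1) (0, 0)).1
             then pvBLoop history cp (cur' + 1)
             else pvBLoop history (cp + 1) cur'
    ((cp, cur') :: r.1, r.2)
  else ([], cp, cur)
termination_by (((history.length : Int) - 1 - cp).toNat, ((PySem.List.pyGetD history (cp + 1) (0, 0)).1 - cur).toNat)
decreasing_by
  · apply Prod.Lex.right
    simp only [cur'] at hc ⊢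
    split at hc <;> split <;> omega
  · apply Prod.Lex.left
    omega

def history_to_sequence_alt (history : List (Int × Int)) : List (Int × Int) :=
  let r := pvBLoop history 0 (-1)
  r.1 ++ [(r.2.1, max r.2.2 (PySem.List.pyGetD history r.2.1 (0, 0)).1)]

-- ===== PRECONDITION & SPEC =====
-- Pre_ excludes only the empty list, on which A raises IndexError (history[-1]).
def Pre_history_to_sequence (history : List (Int × Int)) : Prop := history ≠ []
instance (history : List (Int × Int)) : Decidable (Pre_history_to_sequence history) := by unfold Pre_history_to_sequence; infer_instance
def pvWitness_history_to_sequence : (List (Int × Int)) := [(0, 0), (3, 1)]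

def Spec_history_to_sequence (history : List (Int × Int)) (out : List (Int × Int)) : Prop := out = history_to_sequence_alt history
instance (history : List (Int × Int)) (out : List (Int × Int)) : Decidable (Spec_history_to_sequence history out) := by unfold Spec_history_to_sequence; infer_instance

-- ===== CLAIM (what is proved, stated in full; the proofs are below) =====
def Claim_equal_history_to_sequence : Prop := ∀ (history : List (Int × Int)), Dom_history_to_sequence history → Pre_history_to_sequence history → Spec_history_to_sequence history (history_to_sequence history)

-- ===== LEMMAS AND PROOFS =====

-- cq after A's loop (the loop processes all but the last element)
def pvLoopMax (cq : Int) : List (Int × Int) → Int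
  | [] => cq
  | [_] => cq
  | x :: y :: t => pvLoopMax (max cq x.1) (y :: t)

-- final value of B's `cur` after walking the staircase
def pvWalkEnd (cur : Int) : List (Int × Int) → Int
  | [] => cur
  | [_] => cur
  | x :: y :: t => pvWalkEnd (max (max cur x.1) (y.1 - 1)) (y :: t)

-- common normal form of both step lists
def pvBlocks (cp cq : Int) : List (Int × Int) → List (Int × Int)
  | [] => []
  | [_] => []
  | x :: y :: t =>
    (PySem.List.pyRange (max cq x.1) (max (max cq x.1 + 1) y.1) 1).map (fun v => (cp, v))
      ++ pvBlocks (cp + 1) (max cq x.1) (y :: t)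

theorem pvShift (cp cq a1 : Int) :
    (cp, cq) :: (PySem.List.pyRange 1 (1 + (a1 - cq - 1)) 1).map (fun i => (cp, cq + i))
      = (PySem.List.pyRange cq (max (cq + 1) a1) 1).map (fun v => (cp, v)) := by
  have hcons : PySem.List.pyRange cq (max (cq + 1) a1) 1
      = cq :: PySem.List.pyRange (cq + 1) (max (cq + 1) a1) 1 :=
    PySem.List.pyRange_one_cons (by omega)
  rw [hcons, List.map_cons]
  congr 1
  rw [PySem.List.pyRange_one, PySem.List.pyRange_one, List.map_map, List.map_map]
  have h : (1 + (a1 - cq - 1) - 1).toNat = (max (cq + 1) a1 - (cq + 1)).toNat := by omega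
  rw [h]
  exact List.map_congr_left (fun k _ => by simp; omega)

theorem pvALoopEq (l : List (Int × Int)) : ∀ (cp cq : Int) (steps : List (Int × Int)),
    pvALoop (l.zip (l.drop 1)) cp cq steps = (steps ++ pvBlocks cp cq l, pvLoopMax cq l) := by
  induction l with
  | nil => intro cp cq steps; simp [pvALoop, pvBlocks, pvLoopMax]
  | cons x t ih =>
    intro cp cq steps
    cases t with
    | nil => simp [pvALoop, pvBlocks, pvLoopMax]
    | cons y t' =>
      show pvALoop (((x, y)) :: ((y :: t').zip t')) cp cq steps = _
      have hz : (y :: t').zip t' = (y :: t').zip ((y :: t').drop 1) := rfl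
      simp only [pvALoop, hz, ih]
      simp only [pvBlocks, pvLoopMax]
      rw [Prod.mk.injEq]
      refine ⟨?_, rfl⟩
      simp only [List.append_assoc]
      congr 1
      rw [← List.append_assoc, List.singleton_append, pvShift]

-- indexing helper: pyGetD agrees with the head of the dropped suffix
theorem pvGetD_drop (history : List (Int × Int)) (i : Int) (z : Int × Int)
    (r : List (Int × Int)) (hi : 0 ≤ i) (hd : history.drop i.toNat = z :: r) :
    PySem.List.pyGetD history i (0, 0) = z := by
  rw [PySem.List.pyGetD_of_nonneg _ _ hi]
  have h0 : history[i.toNat]? = some z := by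
    have := (List.getElem?_drop : (history.drop i.toNat)[0]? = history[i.toNat + 0]?)
    rw [hd] at this; simpa using this.symm
  simp [List.getD, h0]

theorem pvDropSucc (history : List (Int × Int)) (i : Int) (z : Int × Int)
    (r : List (Int × Int)) (hi : 0 ≤ i) (hd : history.drop i.toNat = z :: r) :
    history.drop (i + 1).toNat = r := by
  have h : (i + 1).toNat = i.toNat + 1 := by omega
  have h2 : (history.drop i.toNat).drop 1 = r := by rw [hd]; rfl
  rw [List.drop_drop] at h2
  rw [h]
  simpa [Nat.add_comm] using h2

theorem pvBLoopBump (history : List (Int × Int)) (x y : Int × Int) (t : List (Int × Int))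
    (cp c : Int) (hcp : 0 ≤ cp) (hd : history.drop cp.toNat = x :: y :: t) (hxc : x.1 ≤ c) :
    pvBLoop history cp c =
      ((PySem.List.pyRange c (max (c + 1) y.1) 1).map (fun v => (cp, v))
          ++ (pvBLoop history (cp + 1) (max c (y.1 - 1))).1,
       (pvBLoop history (cp + 1) (max c (y.1 - 1))).2) := by
  have hx : PySem.List.pyGetD history cp (0, 0) = x := pvGetD_drop _ _ _ _ hcp hd
  have hy : PySem.List.pyGetD history (cp + 1) (0, 0) = y :=
    pvGetD_drop _ _ _ _ (by omega) (pvDropSucc _ _ _ _ hcp hd)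
  have hlen : history.length = cp.toNat + 2 + t.length := by
    have := congrArg List.length hd
    rw [List.length_drop] at this
    simp at this
    omega
  have hguard : cp < (history.length : Int) - 1 := by
    have h1 : (cp.toNat : Int) = cp := Int.toNat_of_nonneg hcp
    omega
  rw [pvBLoop, dif_pos hguard]
  simp only [hx, hy]
  rw [if_neg (by omega)]
  by_cases hc : c + 1 < y.1
  · rw [dif_pos hc]
    rw [pvBLoopBump history x y t cp (c + 1) hcp hd (by omega)]
    have e1 : max (c + 1) (y.1 - 1) = max c (y.1 - 1) := by omega
    have e2 : PySem.List.pyRange c (max (c + 1) y.1) 1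
        = c :: PySem.List.pyRange (c + 1) (max (c + 1 + 1) y.1) 1 := by
      rw [PySem.List.pyRange_one_cons (by omega)]
      congr 2
      omega
    rw [e1, e2, List.map_cons]
    rfl
  · rw [dif_neg hc]
    have e1 : max c (y.1 - 1) = c := by omega
    have e2 : PySem.List.pyRange c (max (c + 1) y.1) 1 = [c] := by
      have h : max (c + 1) y.1 = c + 1 := by omega
      rw [h, PySem.List.pyRange_one_cons (by omega)]
      simp [PySem.List.pyRange]
    rw [e1, e2, List.map_cons]
    rfl
termination_by (y.1 - c).toNat
decreasing_by omega

theorem pvBlocks_seed (cp c1 c2 : Int) (y : Int × Int) (t : List (Int × Int))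
    (h : max c1 y.1 = max c2 y.1) : pvBlocks cp c1 (y :: t) = pvBlocks cp c2 (y :: t) := by
  cases t <;> simp [pvBlocks, h]

theorem pvBLoopEq (t : List (Int × Int)) : ∀ (x : Int × Int) (cp cur : Int) (history : List (Int × Int)),
    0 ≤ cp → history.drop cp.toNat = x :: t →
    pvBLoop history cp cur =
      (pvBlocks cp cur (x :: t), (history.length : Int) - 1, pvWalkEnd cur (x :: t)) := by
  induction t with
  | nil =>
    intro x cp cur history hcp hd
    have hlen : history.length = cp.toNat + 1 := by
      have := congrArg List.length hd
      rw [List.length_drop] at this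
      simp at this
      omega
    have h1 : (cp.toNat : Int) = cp := Int.toNat_of_nonneg hcp
    rw [pvBLoop, dif_neg (by omega)]
    simp [pvBlocks, pvWalkEnd, Prod.ext_iff]
    omega
  | cons y t' ih =>
    intro x cp cur history hcp hd
    have hx : PySem.List.pyGetD history cp (0, 0) = x := pvGetD_drop _ _ _ _ hcp hd
    have hlen : history.length = cp.toNat + 2 + t'.length := by
      have := congrArg List.length hd
      rw [List.length_drop] at this
      simp at this
      omega
    have hguard : cp < (history.length : Int) - 1 := by
      have h1 : (cp.toNat : Int) = cp := Int.toNat_of_nonneg hcp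
      omega
    have hsame : pvBLoop history cp cur = pvBLoop history cp (max cur x.1) := by
      rw [pvBLoop, pvBLoop, dif_pos hguard, dif_pos hguard]
      simp only [hx]
      have e1 : (if cur < x.1 then x.1 else cur) = max cur x.1 := by split <;> omega
      have e2 : (if max cur x.1 < x.1 then x.1 else max cur x.1) = max cur x.1 := by
        split <;> omega
      rw [e1, e2]
    have hd' := pvDropSucc _ _ _ _ hcp hd
    have ih' := ih y (cp + 1) (max (max cur x.1) (y.1 - 1)) history (by omega) hd'
    rw [hsame, pvBLoopBump history x y t' cp (max cur x.1) hcp hd (le_max_right _ _), ih']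
    simp only [pvBlocks, pvWalkEnd]
    rw [pvBlocks_seed (cp + 1) (max (max cur x.1) (y.1 - 1)) (max cur x.1) y t' (by omega)]

theorem pvWalkEnd_mono (t : List (Int × Int)) : ∀ (x : Int × Int) (c c' : Int),
    c ≤ c' → pvWalkEnd c (x :: t) ≤ pvWalkEnd c' (x :: t) := by
  induction t with
  | nil => intro x c c' h; simpa [pvWalkEnd] using h
  | cons y t' ih =>
    intro x c c' h
    simp only [pvWalkEnd]
    exact ih y _ _ (by omega)

theorem pvLoopMax_le_walk (t : List (Int × Int)) : ∀ (x : Int × Int) (c : Int),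
    pvLoopMax c (x :: t) ≤ pvWalkEnd c (x :: t) := by
  induction t with
  | nil => intro x c; simp [pvLoopMax, pvWalkEnd]
  | cons y t' ih =>
    intro x c
    simp only [pvLoopMax, pvWalkEnd]
    exact le_trans (ih y (max c x.1)) (pvWalkEnd_mono t' y _ _ (by omega))

theorem pvLoopMax_seed_le (t : List (Int × Int)) : ∀ (x : Int × Int) (c : Int),
    c ≤ pvLoopMax c (x :: t) := by
  induction t with
  | nil => intro x c; simp [pvLoopMax]
  | cons y t' ih =>
    intro x c
    simp only [pvLoopMax]
    exact le_trans (le_max_left _ _) (ih y (max c x.1))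

theorem pvLoopMax_max (t : List (Int × Int)) : ∀ (x : Int × Int) (c d : Int),
    pvLoopMax (max c d) (x :: t) = max (pvLoopMax c (x :: t)) d := by
  induction t with
  | nil => intro x c d; simp [pvLoopMax]
  | cons y t' ih =>
    intro x c d
    simp only [pvLoopMax]
    rw [show max (max c d) x.1 = max (max c x.1) d from by omega, ih]

theorem pvWalk_le (t : List (Int × Int)) : ∀ (x : Int × Int) (c : Int),
    pvWalkEnd c (x :: t) ≤ max (pvLoopMax c (x :: t)) (((x :: t).getLast (by simp)).1 - 1) := by
  induction t with
  | nil => intro x c; simp [pvLoopMax, pvWalkEnd]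
  | cons y t' ih =>
    intro x c
    simp only [pvWalkEnd, pvLoopMax]
    rw [List.getLast_cons (show (y :: t') ≠ [] by simp)]
    refine le_trans (ih y _) ?_
    rw [pvLoopMax_max t' y (max c x.1) (y.1 - 1)]
    have hy1 : y.1 - 1 ≤ max (pvLoopMax (max c x.1) (y :: t')) ((((y : Int × Int) :: t').getLast (by simp)).1 - 1) := by
      cases t' with
      | nil => simp [pvLoopMax]
      | cons z t'' =>
        have h1 : max c x.1 ≤ pvLoopMax (max c x.1) (y :: z :: t'') :=
          pvLoopMax_seed_le (z :: t'') y (max c x.1)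
        have h2 : max (max c x.1) y.1 ≤ pvLoopMax (max (max c x.1) y.1) (z :: t'') :=
          pvLoopMax_seed_le t'' z _
        have h3 : pvLoopMax (max c x.1) (y :: z :: t'')
            = pvLoopMax (max (max c x.1) y.1) (z :: t'') := rfl
        omega
    omega

theorem pvWalkLoopMax (t : List (Int × Int)) : ∀ (x : Int × Int) (cur : Int),
    max (pvWalkEnd cur (x :: t)) ((x :: t).getLast (by simp)).1
      = max (pvLoopMax cur (x :: t)) ((x :: t).getLast (by simp)).1 := by
  intro x cur
  have h1 := pvLoopMax_le_walk t x cur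
  have h2 := pvWalk_le t x cur
  omega

-- ===== VERDICT (by name: the statement is the Claim_ definition above) =====
theorem history_to_sequence_spec : Claim_equal_history_to_sequence := by
  intro history _hdom hpre
  unfold Spec_history_to_sequence
  cases history with
  | nil => exact absurd rfl hpre
  | cons x l =>
    simp only [history_to_sequence, history_to_sequence_alt]
    rw [pvALoopEq (x :: l) 0 (-1) []]
    rw [pvBLoopEq l x 0 (-1) (x :: l) (by omega) (by simp)]
    have hne : (x :: l) ≠ [] := by simp
    have hfinA : ((PySem.List.pyGet? (x :: l) (-1)).getD (0, 0)) = (x :: l).getLast hne := by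
      rw [PySem.List.pyGet?_neg_one, List.getLast?_eq_some_getLast hne]
      rfl
    have hfinB : PySem.List.pyGetD (x :: l) (((x :: l).length : Int) - 1) (0, 0)
        = (x :: l).getLast hne := by
      rw [PySem.List.pyGetD_of_nonneg _ _ (by simp)]
      have ht : (((x :: l).length : Int) - 1).toNat = (x :: l).length - 1 := by
        simp
      rw [ht, List.getD_eq_getElem _ _ (by simp)]
      rw [List.getLast_eq_getElem hne]
      rfl
    simp only [hfinA, hfinB]
    rw [pvWalkLoopMax l x (-1)]
    simp
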